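-- pv_equiv track=rewrite | github.com/ashishgupta2014/problem_solving_practices | string_problem/count_k_1_on_string_of_substring.py | solve
-- ===== SOURCE A (Python) =====
-- def solve(K,s):
--     """
--     https://app.glider.ai/practice/problem/algorithms/exactly-k-1s/problem
--
--     https://www.geeksforgeeks.org/count-substrings-binary-string-containing-k-ones/
--
--
--     You are given a binary string  i.e, a string that contains only 1s and 0s.
--     You must count the number of sub strings which contain exactly K 1s.
--     :param K:
--     :param s:
--     :return:
--     """
--     N = len(s)
--     res = 0
--     countOfOne = 0
--     freq = [0 for _ in range(N + 1)]
--
--     # initialize index having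
--     # zero sum as 1
--     freq[0] = 1
--
--     # loop over binary characters of string
--     for i in s:
--
--         # update countOfOne variable with
--         # value of ith character
--         countOfOne += ord(i) - ord('0')
--
--         # if value reaches more than K,
--         # then update result
--         if (countOfOne >= K):
--             # add frequency of indices, having
--             # sum (current sum - K), to the result
--             res += freq[countOfOne - K]
--
--             # update freqency of one's count
--         freq[countOfOne] += 1
--
--     return res
-- ===== SOURCE B (Python) =====
-- def solve(K, s):
--     if K < 0:
--         return 0
--     prefix = [0]
--     for c in s:
--         prefix.append(prefix[-1] + (c == '1'))
--     cnt = {}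
--     for v in prefix:
--         cnt[v] = cnt.get(v, 0) + 1
--     if K == 0:
--         return sum(c * (c - 1) // 2 for c in cnt.values())
--     return sum(c * cnt.get(v + K, 0) for v, c in cnt.items())
-- ===== Notes on version B (the rewrite author's own statement) =====
-- stated objective: alternative
-- what changed: A streams over the string keeping a length-(N+1) frequency array of prefix sums and adding freq[sum-K] at every step; B first builds the prefix-sum list, then builds one occurrence dictionary of it and computes the answer by a closed-form pair count over the dictionary (sum of cnt[v]*cnt[v+K], or C(c,2) per value when K=0), returning 0 directly for negative K.
-- outside the precondition, e.g. on solve(0, '/0'): A returns 0, B returns 3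
import Mathlib
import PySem

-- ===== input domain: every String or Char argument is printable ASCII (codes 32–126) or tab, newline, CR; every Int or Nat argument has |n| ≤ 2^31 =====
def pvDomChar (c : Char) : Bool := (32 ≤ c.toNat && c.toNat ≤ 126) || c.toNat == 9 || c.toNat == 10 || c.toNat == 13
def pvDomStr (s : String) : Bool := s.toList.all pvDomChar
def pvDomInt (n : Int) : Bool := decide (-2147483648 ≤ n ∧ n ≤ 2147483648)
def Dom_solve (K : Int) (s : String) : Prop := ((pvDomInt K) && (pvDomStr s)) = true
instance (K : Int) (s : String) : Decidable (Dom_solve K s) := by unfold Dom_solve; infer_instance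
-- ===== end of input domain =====

-- B replaces A's streaming prefix-sum frequency array by a two-phase closed-form pair count over an occurrence dictionary (return value only; neither version mutates its arguments).

-- ===== PORT A =====
-- one step of A's loop; pyGetD/pySetD are the total forms of freq[i] — exact here because Pre_solve keeps every accessed index in range
def solveStep (K : Int) (st : Int × Int × List Int) (c : Char) : Int × Int × List Int :=
  let cnt' := st.2.1 + ((c.toNat : Int) - 48)
  let res' := if K ≤ cnt' then st.1 + PySem.List.pyGetD st.2.2 (cnt' - K) 0 else st.1
  let freq' := PySem.List.pySetD st.2.2 cnt' (PySem.List.pyGetD st.2.2 cnt' 0 + 1)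
  (res', cnt', freq')

def solve (K : Int) (s : String) : Int :=
  let N := s.toList.length
  let freq := (List.replicate (N + 1) (0 : Int)).set 0 1
  (s.toList.foldl (solveStep K) (0, 0, freq)).1

-- ===== PORT B =====
def solve_alt (K : Int) (s : String) : Int :=
  if K < 0 then 0
  else
    let pfx := s.toList.foldl
      (fun (p : List Int) c => p ++ [PySem.List.pyGetD p (-1) 0 + (if c = '1' then 1 else 0)]) [0]
    let cnt := pfx.foldl (fun (d : PySem.Dict Int Int) v => d.insert v (d.getD v 0 + 1)) PySem.Dict.empty
    if K = 0 then (cnt.values.map (fun c => PySem.Int.floordiv (c * (c - 1)) 2)).sum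
    else (cnt.items.map (fun vc => vc.2 * cnt.getD (vc.1 + K) 0)).sum

-- ===== PRECONDITION & SPEC =====
-- Pre_ restricts to the function's natural domain, binary strings (on any other character A misreads it via ord(c)-48,
-- wrapping negative list indices or raising IndexError), and further excludes the inputs on which A raises IndexError:
-- K < 0 with a nonempty s whose count of '1' exceeds len(s)+K.
def Pre_solve (K : Int) (s : String) : Prop :=
  (s.toList.all (fun c => c == '0' || c == '1') = true) ∧
  ((0:Int) ≤ K ∨ s.toList.length = 0 ∨ (s.toList.count '1' : Int) ≤ s.toList.length + K)
instance (K : Int) (s : String) : Decidable (Pre_solve K s) := by unfold Pre_solve; infer_instance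

def pvWitness_solve : Int × String := (1, "10110")

def Spec_solve (K : Int) (s : String) (out : Int) : Prop := out = solve_alt K s
instance (K : Int) (s : String) (out : Int) : Decidable (Spec_solve K s out) := by unfold Spec_solve; infer_instance

-- ===== CLAIM (what is proved, stated in full; the proofs are below) =====
def Claim_equal_solve : Prop := ∀ (K : Int) (s : String), Dom_solve K s → Pre_solve K s → Spec_solve K s (solve K s)

-- ===== LEMMAS AND PROOFS =====

-- the 0/1 value of a binary character
def bitc (c : Char) : Int := if c = '1' then 1 else 0

-- prefix sums of the remaining characters, starting from running sum a
def psF (a : Int) : List Char → List Int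
  | [] => []
  | c :: cs => (a + bitc c) :: psF (a + bitc c) cs

-- number of index pairs i < j with l[j] - l[i] = K, decomposed by the first element
def pairCnt (K : Int) : List Int → Int
  | [] => 0
  | a :: l => (l.count (a + K) : Int) + pairCnt K l

-- A's residual result: for each future prefix sum v, the count of v - K among the sums seen so far
def sA (K : Int) (seen : List Int) : List Int → Int
  | [] => 0
  | v :: l => (seen.count (v - K) : Int) + sA K (seen ++ [v]) l

theorem sA_eq (K : Int) : ∀ (l seen : List Int),
    sA K seen l = (seen.map (fun x => (l.count (x + K) : Int))).sum + pairCnt K l := by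
  intro l
  induction l with
  | nil => intro seen; simp [sA, pairCnt]
  | cons v l ih =>
    intro seen
    rw [sA, ih, pairCnt]
    have h1 : (seen.map (fun x => ((v :: l).count (x + K) : Int)))
        = (seen.map (fun x => (l.count (x + K) : Int) + (if (x == v - K) = true then 1 else 0))) := by
      apply List.map_congr_left
      intro x _
      rw [List.count_cons]
      by_cases h : x = v - K
      · simp [h, show v - K + K = v by ring]
      · have h' : ¬ (v = x + K) := by intro hc; exact h (by omega)
        simp [h, h']
    rw [h1, PySem.List.sum_map_add_int, PySem.List.sum_map_ite_one_zero,
      List.map_append, List.sum_append]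
    have h2 : List.countP (fun x => x == v - K) seen = seen.count (v - K) := rfl
    rw [h2]
    simp
    ring1

theorem psF_mem_le : ∀ (cs : List Char) (a : Int), ∀ x ∈ psF a cs, a ≤ x := by
  intro cs
  induction cs with
  | nil => intro a x hx; simp [psF] at hx
  | cons c cs ih =>
    intro a x hx
    have hb : 0 ≤ bitc c := by unfold bitc; split <;> norm_num
    rcases (by simpa [psF] using hx : x = a + bitc c ∨ x ∈ psF (a + bitc c) cs) with h | h
    · omega
    · have := ih (a + bitc c) x h; omega

theorem psF_pairwise : ∀ (cs : List Char) (a : Int), (a :: psF a cs).Pairwise (· ≤ ·) := by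
  intro cs
  induction cs with
  | nil => intro a; simp [psF]
  | cons c cs ih =>
    intro a
    have hb : 0 ≤ bitc c := by unfold bitc; split <;> norm_num
    refine List.pairwise_cons.mpr ⟨?_, ?_⟩
    · intro x hx
      rcases (by simpa [psF] using hx : x = a + bitc c ∨ x ∈ psF (a + bitc c) cs) with h | h
      · omega
      · have := psF_mem_le cs (a + bitc c) x h; omega
    · simpa [psF] using ih (a + bitc c)

theorem pairCnt_neg (K : Int) (hK : K < 0) :
    ∀ l : List Int, l.Pairwise (· ≤ ·) → pairCnt K l = 0 := by
  intro l
  induction l with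
  | nil => intro _; rfl
  | cons a l ih =>
    intro hp
    rcases List.pairwise_cons.mp hp with ⟨ha, hl⟩
    rw [pairCnt, ih hl]
    have h : l.count (a + K) = 0 := by
      rw [List.count_eq_zero]
      intro hc
      have := ha _ hc
      omega
    simp [h]

theorem sum_count_shift_pos (K : Int) (hK : 0 < K) :
    ∀ l : List Int, l.Pairwise (· ≤ ·) →
      (l.map (fun x => (l.count (x + K) : Int))).sum = pairCnt K l := by
  intro l
  induction l with
  | nil => intro _; simp [pairCnt]
  | cons a l ih =>
    intro hp
    rcases List.pairwise_cons.mp hp with ⟨ha, hl⟩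
    rw [pairCnt, ← ih hl]
    simp only [List.map_cons, List.sum_cons]
    have h1 : (a :: l).count (a + K) = l.count (a + K) := by
      rw [List.count_cons]
      have h' : ¬ (a = a + K) := by omega
      simp [h']
    have h2 : (l.map (fun x => ((a :: l).count (x + K) : Int)))
        = (l.map (fun x => (l.count (x + K) : Int))) := by
      apply List.map_congr_left
      intro x hx
      rw [List.count_cons]
      have h' : ¬ (a = x + K) := by have := ha x hx; omega
      simp [h']
    rw [h1, h2]

theorem pairCnt_zero_eq_choose :
    ∀ l : List Int, pairCnt 0 l = ∑ m ∈ l.toFinset, ((l.count m).choose 2 : Int) := by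
  intro l
  induction l with
  | nil => simp [pairCnt]
  | cons a l ih =>
    rw [pairCnt, ih]
    have hcc : ((a :: l).count a).choose 2 = (l.count a).choose 2 + l.count a := by
      rw [List.count_cons_self]
      simp [Nat.choose_succ_succ, Nat.choose_one_right, Nat.succ_eq_add_one]
      omega
    have hother : ∀ m ∈ l.toFinset.erase a, ((a :: l).count m) = l.count m := by
      intro m hm
      have h' : ¬ (a = m) := fun hc => (Finset.mem_erase.mp hm).1 hc.symm
      rw [List.count_cons]
      simp [h']
    by_cases h : a ∈ l
    · have hmem : a ∈ l.toFinset := List.mem_toFinset.mpr h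
      have ht : (a :: l).toFinset = l.toFinset := by
        simp [List.toFinset_cons, Finset.insert_eq_self.mpr hmem]
      rw [ht, ← Finset.add_sum_erase _ _ hmem, ← Finset.add_sum_erase _ _ hmem, hcc]
      have hsum : ∑ m ∈ l.toFinset.erase a, (((a :: l).count m).choose 2 : Int)
          = ∑ m ∈ l.toFinset.erase a, ((l.count m).choose 2 : Int) :=
        Finset.sum_congr rfl (fun m hm => by rw [hother m hm])
      rw [hsum]
      push_cast
      ring_nf
    · have hz : l.count a = 0 := List.count_eq_zero.mpr h
      have hmem : a ∉ l.toFinset := fun hc => h (List.mem_toFinset.mp hc)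
      have ht : (a :: l).toFinset = insert a l.toFinset := List.toFinset_cons
      rw [ht, Finset.sum_insert hmem, hcc, hz]
      have hsum : ∑ m ∈ l.toFinset, (((a :: l).count m).choose 2 : Int)
          = ∑ m ∈ l.toFinset, ((l.count m).choose 2 : Int) := by
        apply Finset.sum_congr rfl
        intro m hm
        have h' : ¬ (a = m) := fun hc => hmem (hc ▸ hm)
        rw [List.count_cons]
        simp [h']
      rw [hsum]
      simp [hz]

theorem pySetD_in_range (xs : List Int) (i : Int) (v : Int) (h0 : 0 ≤ i) (h1 : i < xs.length) :
    PySem.List.pySetD xs i v = xs.set i.toNat v := by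
  simp [PySem.List.pySetD, PySem.List.pySet?, PySem.List.pyIdx?, h0, h1]

-- invariant of A's loop: freq is the occurrence table of the prefix sums seen so far and
-- res accumulates, for each new prefix sum, the number of earlier prefix sums equal to it minus K
theorem loopA (K : Int) (N : Nat) :
    ∀ (cs : List Char) (seen : List Int) (res cnt : Int) (freq : List Int),
      (∀ c ∈ cs, c = '0' ∨ c = '1') →
      freq.length = N + 1 →
      (∀ v : Nat, v ≤ N → freq.getD v 0 = (seen.count (v : Int) : Int)) →
      (∀ x ∈ seen, 0 ≤ x) →
      0 ≤ cnt →
      cnt + (cs.count '1' : Int) ≤ N →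
      cnt + (cs.count '1' : Int) - K ≤ N →
      (cs.foldl (solveStep K) (res, cnt, freq)).1 = res + sA K seen (psF cnt cs) := by
  intro cs
  induction cs with
  | nil => intro seen res cnt freq _ _ _ _ _ _ _; simp [sA, psF]
  | cons c cs ih =>
    intro seen res cnt freq hbin hlen hfreq hpos hcnt hF hFK
    have hc := hbin c (List.mem_cons_self)
    have hbit : ((c.toNat : Int) - 48) = bitc c := by
      rcases hc with h | h <;> subst h <;> simp [bitc]
    have hcount1 : ((c :: cs).count '1' : Int) = (cs.count '1' : Int) + bitc c := by
      rw [List.count_cons]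
      by_cases h : c = '1' <;> simp [bitc, h]
    have hb0 : 0 ≤ bitc c := by unfold bitc; split <;> norm_num
    set cnt' := cnt + bitc c with hcnt'
    have hF' : cnt' + (cs.count '1' : Int) ≤ N := by rw [hcount1] at hF; omega
    have hFK' : cnt' + (cs.count '1' : Int) - K ≤ N := by rw [hcount1] at hFK; omega
    have hcs : (0:Int) ≤ (cs.count '1' : Int) := by positivity
    have hcub : cnt' ≤ N := by omega
    have hc0 : 0 ≤ cnt' := by omega
    have hstep : solveStep K (res, cnt, freq) c
        = (res + (seen.count (cnt' - K) : Int), cnt',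
           freq.set cnt'.toNat ((seen.count cnt' : Int) + 1)) := by
      unfold solveStep
      simp only [hbit, ← hcnt']
      congr 1
      · by_cases hg : K ≤ cnt'
        · have h0 : (0:Int) ≤ cnt' - K := by omega
          have h1 : cnt' - K < (freq.length : Int) := by rw [hlen]; push_cast; omega
          rw [if_pos hg, PySem.List.pyGetD_eq_getElem freq 0 h0 h1]
          have hle : (cnt' - K).toNat ≤ N := by omega
          have hlt : (cnt' - K).toNat < freq.length := by omega
          rw [← List.getD_eq_getElem freq 0 hlt, hfreq _ hle, Int.toNat_of_nonneg h0]
        · rw [if_neg hg]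
          have h : seen.count (cnt' - K) = 0 := by
            rw [List.count_eq_zero]
            intro hmem
            have := hpos _ hmem
            omega
          rw [h]
          simp
      · have h1 : cnt' < (freq.length : Int) := by rw [hlen]; push_cast; omega
        rw [pySetD_in_range freq cnt' _ hc0 h1, PySem.List.pyGetD_eq_getElem freq 0 hc0 h1]
        have hle : cnt'.toNat ≤ N := by omega
        have hlt : cnt'.toNat < freq.length := by omega
        rw [← List.getD_eq_getElem freq 0 hlt, hfreq _ hle, Int.toNat_of_nonneg hc0]
    rw [List.foldl_cons, hstep]
    rw [ih (seen ++ [cnt']) _ cnt' _ (fun c' hc' => hbin c' (List.mem_cons_of_mem _ hc'))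
      (by simpa using hlen)
      ?_ ?_ hc0 hF' hFK']
    · rw [psF, ← hbit, hbit, ← hcnt', sA]
      ring1
    · intro v hv
      have hvlt : v < (freq.set cnt'.toNat ((seen.count cnt' : Int) + 1)).length := by
        simp [hlen]; omega
      rw [List.getD_eq_getElem _ 0 hvlt, List.getElem_set]
      have hvlt' : v < freq.length := by simpa using hvlt
      rw [List.count_append]
      by_cases h : cnt'.toNat = v
      · have hvc : (v : Int) = cnt' := by omega
        rw [if_pos h, hvc]
        have h1 : List.count cnt' [cnt'] = 1 := by simp
        rw [h1]
        push_cast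
        ring1
      · have hvc : ¬ ((cnt' : Int) = (v : Int)) := by omega
        rw [if_neg h, ← List.getD_eq_getElem freq 0 hvlt', hfreq _ hv]
        simp [List.count_cons]
        intro hcontra
        exact absurd hcontra.symm (by omega)
    · intro x hx
      rcases List.mem_append.mp hx with h | h
      · exact hpos _ h
      · simp at h; omega

theorem sum_count_mul (l : List Int) (f : Int → Int) :
    ((PySem.Set.ofList l).map (fun k => (l.count k : Int) * f k)).sum = (l.map f).sum := by
  rw [← List.sum_toFinset _ (PySem.Set.nodup_ofList l), Finset.sum_list_map_count]
  have h : (PySem.Set.ofList l).toFinset = l.toFinset := by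
    ext x; simp [PySem.Set.mem_ofList]
  rw [h]
  exact Finset.sum_congr rfl (fun m _ => by simp)

theorem floordiv_choose (n : Nat) :
    PySem.Int.floordiv ((n:Int) * ((n:Int) - 1)) 2 = (n.choose 2 : Int) := by
  rw [PySem.Int.floordiv_eq_ediv_of_pos (by norm_num), Nat.choose_two_right]
  rcases n with _|m
  · simp
  · have h : ((m+1:Nat):Int) * (((m+1:Nat):Int) - 1) = (((m+1)*m : Nat) : Int) := by push_cast; ring
    rw [h, Int.natCast_div]
    norm_num

theorem pfx_fold (cs : List Char) : ∀ (p : List Int) (x : Int),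
    (cs.foldl (fun (p : List Int) c => p ++ [PySem.List.pyGetD p (-1) 0 + (if c = '1' then 1 else 0)]) (p ++ [x]))
      = (p ++ [x]) ++ psF x cs := by
  induction cs with
  | nil => intro p x; simp [psF]
  | cons c cs ih =>
    intro p x
    rw [List.foldl_cons, PySem.List.pyGetD_neg_one_append_singleton]
    have h : (p ++ [x]) ++ [x + (if c = '1' then 1 else 0)] = (p ++ [x]) ++ [x + bitc c] := by
      simp [bitc]
    rw [h, ih (p ++ [x]) (x + bitc c), psF]
    simp

theorem solve_eq_pairCnt (K : Int) (s : String)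
    (hbin : ∀ c ∈ s.toList, c = '0' ∨ c = '1')
    (hK : (0:Int) ≤ K ∨ s.toList.length = 0 ∨ (s.toList.count '1' : Int) ≤ s.toList.length + K) :
    solve K s = pairCnt K (0 :: psF 0 s.toList) := by
  rcases (em (s.toList = [])) with hnil | hne
  · unfold solve
    rw [hnil]
    simp [pairCnt, psF]
  · have hcnt : (s.toList.count '1' : Int) ≤ s.toList.length := by
      exact_mod_cast List.count_le_length
    have hFK : (0:Int) + (s.toList.count '1' : Int) - K ≤ s.toList.length := by
      rcases hK with h | h | h
      · omega
      · exact absurd (List.length_eq_zero_iff.mp h) hne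
      · omega
    unfold solve
    rw [loopA K s.toList.length s.toList [0] 0 0 _ hbin (by simp)
      (fun v hv => by
        have hvlt : v < ((List.replicate (s.toList.length + 1) (0:Int)).set 0 1).length := by
          rw [List.length_set, List.length_replicate]; omega
        rw [List.getD_eq_getElem _ 0 hvlt, List.getElem_set]
        by_cases h : v = 0
        · subst h; simp
        · have h' : ¬ ((0:Int) = (v:Int)) := by omega
          have h'' : ¬ (0 = v) := by omega
          simp [h'', h'])
      (by intro x hx; simp at hx; omega) le_rfl (by omega) hFK]
    rw [sA_eq, pairCnt]
    simp

theorem solve_alt_eq_pairCnt (K : Int) (s : String) (hK : 0 ≤ K) :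
    solve_alt K s = pairCnt K (0 :: psF 0 s.toList) := by
  unfold solve_alt
  rw [if_neg (not_lt.mpr hK)]
  have hpfx : (s.toList.foldl
      (fun (p : List Int) c => p ++ [PySem.List.pyGetD p (-1) 0 + (if c = '1' then 1 else 0)]) [0])
      = 0 :: psF 0 s.toList := by
    have := pfx_fold s.toList [] 0
    simpa using this
  rw [hpfx]
  set L := 0 :: psF 0 s.toList with hL
  show (if K = 0 then (((PySem.Dict.counter L).values).map (fun c => PySem.Int.floordiv (c * (c - 1)) 2)).sum
    else (((PySem.Dict.counter L).items).map (fun vc => vc.2 * (PySem.Dict.counter L).getD (vc.1 + K) 0)).sum)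
      = pairCnt K L
  by_cases h0 : K = 0
  · rw [if_pos h0, h0]
    have hv : (PySem.Dict.counter L).values
        = (PySem.Set.ofList L).map (fun k => ((L.count k : Int))) := by
      show ((PySem.Dict.counter L).items).map (·.2) = _
      rw [PySem.Dict.items_counter, List.map_map]
      rfl
    rw [hv, List.map_map]
    have hmap : ((PySem.Set.ofList L).map
        ((fun c => PySem.Int.floordiv (c * (c - 1)) 2) ∘ fun k => ((L.count k : Int))))
        = (PySem.Set.ofList L).map (fun k => (((L.count k).choose 2 : Nat) : Int)) := by
      apply List.map_congr_left
      intro k _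
      simp only [Function.comp]
      exact floordiv_choose (L.count k)
    rw [hmap, ← List.sum_toFinset _ (PySem.Set.nodup_ofList L)]
    have hfin : (PySem.Set.ofList L).toFinset = L.toFinset := by
      ext x; simp [PySem.Set.mem_ofList]
    rw [hfin, pairCnt_zero_eq_choose]
  · have hKpos : 0 < K := by omega
    rw [if_neg h0]
    rw [PySem.Dict.items_counter, List.map_map]
    have hmap : ((PySem.Set.ofList L).map
        ((fun vc : Int × Int => vc.2 * (PySem.Dict.counter L).getD (vc.1 + K) 0) ∘ fun k => (k, (L.count k : Int))))
        = (PySem.Set.ofList L).map (fun k => (L.count k : Int) * (L.count (k + K) : Int)) := by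
      apply List.map_congr_left
      intro k _
      simp only [Function.comp]
      rw [PySem.Dict.getD_counter]
    rw [hmap, sum_count_mul L (fun k => (L.count (k + K) : Int)),
      sum_count_shift_pos K hKpos L (psF_pairwise s.toList 0)]

-- ===== VERDICT (by name: the statement is the Claim_ definition above) =====
theorem solve_spec : Claim_equal_solve := by
  intro K s _ hpre
  have hbin : ∀ c ∈ s.toList, c = '0' ∨ c = '1' := by
    intro c hc
    have := List.all_eq_true.mp hpre.1 c hc
    simpa using this
  unfold Spec_solve
  by_cases h : 0 ≤ K
  · rw [solve_eq_pairCnt K s hbin hpre.2, solve_alt_eq_pairCnt K s h]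
  · have hneg : K < 0 := by omega
    rw [solve_eq_pairCnt K s hbin hpre.2]
    unfold solve_alt
    rw [if_pos hneg, pairCnt_neg K hneg _ (psF_pairwise s.toList 0)]
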